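-- pv_equiv track=rewrite | github.com/podaac/l2ss-py | podaac/subsetter/utils/variables_utils.py | normalize_candidate_paths_against_dtree
-- ===== SOURCE A (Python) =====
-- from typing import List
--
-- def _normalize_for_matching(path: str) -> str:
--     """
--     Normalize path for matching:
--     - Remove spaces and underscores
--     - Lowercase
--     - Strip leading slash
--     """
--     return path.lstrip("/").replace(" ", "").replace("_", "").lower()
--
-- def normalize_candidate_paths_against_dtree(
--     candidates: List[str], all_vars: List[str]
-- ) -> List[str]:
--     """
--     Normalize and match candidate variable paths to actual variable paths from a DataTree.
--
--     - Normalization ignores differences between underscores and spaces.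
--     - Matching is case-insensitive.
--     - If a match is found, the actual variable path from the DataTree is returned.
--     - If no match is found, the original candidate path is returned as-is.
--
--     Parameters
--     ----------
--     candidates : List[str]
--         List of candidate variable paths (e.g., from user input or spreadsheets).
--
--     all_vars : List[str]
--         List of actual variable paths from the DataTree, typically from
--         get_all_variable_names_from_dtree(dtree).
--
--     Returns
--     -------
--     List[str]
--         List of resolved variable paths:
--         - Matched paths are returned using their canonical DataTree form.
--         - Unmatched candidates are returned unchanged.
--     """
--     # Build normalized lookup: no slashes, underscores/spaces ignored
--     norm_to_real = {
--         _normalize_for_matching(real_path): real_path for real_path in all_vars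
--     }
--
--     resolved = []
--     for cand in candidates:
--         norm_cand = _normalize_for_matching(cand)
--         match = norm_to_real.get(norm_cand)
--
--         if match:
--             # Ensure only one leading slash
--             resolved_path = "/" + match.lstrip("/")
--         else:
--             # Keep the original candidate exactly as given
--             resolved_path = cand
--
--         resolved.append(resolved_path)
--
--     return resolved
-- ===== SOURCE B (Python) =====
-- from typing import List
--
--
-- def _normalize_for_matching(path: str) -> str:
--     return path.lstrip("/").replace(" ", "").replace("_", "").lower()
--
--
-- def normalize_candidate_paths_against_dtree(
--     candidates: List[str], all_vars: List[str]
-- ) -> List[str]: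
--     # Inverted index: group candidate positions by their normalized form,
--     # then sweep the canonical paths once, writing each one into every
--     # candidate slot it resolves.
--     want = {}
--     for i, cand in enumerate(candidates):
--         want.setdefault(_normalize_for_matching(cand), []).append(i)
--
--     resolved = list(candidates)
--     for real_path in all_vars:
--         for i in want.get(_normalize_for_matching(real_path), ()):
--             resolved[i] = "/" + real_path.lstrip("/")
--     return resolved
-- ===== Notes on version B (the rewrite author's own statement) =====
-- stated objective: alternative
-- what changed: B inverts the lookup direction: instead of indexing the canonical paths by normalized key and looking each candidate up, it groups candidate positions by normalized form and sweeps all_vars once, writing each canonical path into every candidate slot it resolves; Pre_ excludes the corner where '' is in all_vars and some candidate normalizes to '', on which A's truthiness ('' and anything it shadows count as no match) and B's treatment of '' as an ordinary path are both defensible.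
-- outside the precondition, e.g. on normalize_candidate_paths_against_dtree(['_'], ['']): A returns ['_'], B returns ['/']; on normalize_candidate_paths_against_dtree(['//'], ['/', '']): A returns ['//'], B returns ['/']
import Mathlib
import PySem

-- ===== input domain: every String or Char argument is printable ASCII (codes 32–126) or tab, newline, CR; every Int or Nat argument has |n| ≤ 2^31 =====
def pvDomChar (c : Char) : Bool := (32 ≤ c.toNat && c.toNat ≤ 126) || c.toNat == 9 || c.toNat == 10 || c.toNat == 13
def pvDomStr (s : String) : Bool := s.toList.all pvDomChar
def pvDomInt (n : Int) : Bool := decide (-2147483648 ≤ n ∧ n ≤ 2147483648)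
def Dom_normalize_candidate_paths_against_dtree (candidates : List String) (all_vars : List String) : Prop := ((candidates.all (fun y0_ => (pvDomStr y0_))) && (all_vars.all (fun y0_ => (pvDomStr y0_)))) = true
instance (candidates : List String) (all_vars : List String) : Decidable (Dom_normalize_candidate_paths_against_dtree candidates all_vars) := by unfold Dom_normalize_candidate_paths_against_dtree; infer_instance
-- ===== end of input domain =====

-- B inverts the lookup: it groups candidate positions by normalized form and sweeps all_vars once,
-- writing each canonical path into the slots it resolves (objective: alternative decomposition).

-- ===== PORT A =====
-- _normalize_for_matching: path.lstrip("/").replace(" ", "").replace("_", "").lower()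
-- lstrip("/") with the one-char set {'/'} is dropWhile (· == '/') — exact by hand
def pvNorm (path : String) : String :=
  String.ofList (PySem.Chars.lower
    (PySem.Chars.replace (PySem.Chars.replace (path.toList.dropWhile (· == '/')) [' '] []) ['_'] []))

-- "/" + match.lstrip("/")  (string concat done on the char list — exact)
def pvSlashed (m : String) : String :=
  String.ofList ('/' :: m.toList.dropWhile (· == '/'))

def normalize_candidate_paths_against_dtree (candidates : List String) (all_vars : List String) : List String :=
  let norm_to_real : PySem.Dict String String :=
    all_vars.foldl (fun d real_path => d.insert (pvNorm real_path) real_path) PySem.Dict.empty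
  candidates.foldl (fun resolved cand =>
    let m := norm_to_real.get? (pvNorm cand)
    let resolved_path :=
      match m with
      | some mv => if mv == "" then cand else pvSlashed mv   -- 'if match:' — empty string is falsy
      | none => cand
    resolved ++ [resolved_path]) []

-- ===== PORT B =====
def normalize_candidate_paths_against_dtree_alt (candidates : List String) (all_vars : List String) : List String :=
  -- want.setdefault(norm, []).append(i)  =  want[norm] = want.get(norm, []) + [i]  =  Dict.modify
  let want : PySem.Dict String (List Int) :=
    (PySem.List.enumerate candidates).foldl
      (fun d p => d.modify (pvNorm p.2) [] (· ++ [p.1])) PySem.Dict.empty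
  let resolved := candidates
  all_vars.foldl (fun resolved real_path =>
    (want.getD (pvNorm real_path) []).foldl
      (fun r i => r.set i.toNat (pvSlashed real_path)) resolved)   -- resolved[i] = …; i ≥ 0 from enumerate
    resolved

-- ===== PRECONDITION & SPEC =====
-- Pre_ excludes the corner where all_vars contains the empty string AND some candidate normalizes
-- to the empty string: there A's truthiness test makes '' (and any path it shadows in the dict)
-- count as no match while B treats '' as an ordinary path — both defensible; A still returns there
-- (see claim.json cites).
def Pre_normalize_candidate_paths_against_dtree (candidates : List String) (all_vars : List String) : Prop :=
  ¬ ("" ∈ all_vars ∧ ∃ c ∈ candidates, pvNorm c = "")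
instance (candidates : List String) (all_vars : List String) : Decidable (Pre_normalize_candidate_paths_against_dtree candidates all_vars) := by unfold Pre_normalize_candidate_paths_against_dtree; infer_instance

def pvWitness_normalize_candidate_paths_against_dtree : List String × List String :=
  (["Sea Surface_Temp", "/other"], ["/sea_surface_temp", "/lat"])

def Spec_normalize_candidate_paths_against_dtree (candidates : List String) (all_vars : List String) (out : List String) : Prop := out = normalize_candidate_paths_against_dtree_alt candidates all_vars
instance (candidates : List String) (all_vars : List String) (out : List String) : Decidable (Spec_normalize_candidate_paths_against_dtree candidates all_vars out) := by unfold Spec_normalize_candidate_paths_against_dtree; infer_instance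

-- ===== CLAIM (what is proved, stated in full; the proofs are below) =====
def Claim_equal_normalize_candidate_paths_against_dtree : Prop := ∀ (candidates : List String) (all_vars : List String), Dom_normalize_candidate_paths_against_dtree candidates all_vars → Pre_normalize_candidate_paths_against_dtree candidates all_vars → Spec_normalize_candidate_paths_against_dtree candidates all_vars (normalize_candidate_paths_against_dtree candidates all_vars)

-- ===== LEMMAS AND PROOFS =====

-- last-wins scan over a list, the common reference both sides are reduced to
def pvScan (l : List String) (nc : String) (a : Option String) : Option String :=
  l.foldl (fun acc v => if pvNorm v == nc then some v else acc) a

-- A's dict lookup is the last-wins scan.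
theorem pv_dict_eq_scan (l : List String) (nc : String) (d : PySem.Dict String String) :
    (l.foldl (fun d v => d.insert (pvNorm v) v) d).get? nc
      = pvScan l nc (d.get? nc) := by
  induction l generalizing d with
  | nil => rfl
  | cons v t ih =>
    simp only [List.foldl_cons, pvScan, ih, PySem.Dict.get?_insert]
    by_cases h : pvNorm v = nc
    · simp [h]
    · simp [h, Ne.symm h]

theorem pvScan_init (l : List String) (nc : String) (a : Option String) :
    pvScan l nc a = match pvScan l nc none with | some w => some w | none => a := by
  induction l generalizing a with
  | nil => rfl
  | cons v t ih =>
    have h1 : ∀ b, pvScan (v :: t) nc b = pvScan t nc (if pvNorm v == nc then some v else b) :=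
      fun b => rfl
    rw [h1, h1, ih, ih (if pvNorm v == nc then some v else none)]
    cases h : pvScan t nc none with
    | some w => rfl
    | none => by_cases hv : pvNorm v == nc <;> simp [hv]

theorem pvScan_mem (l : List String) (nc : String) (w : String)
    (h : pvScan l nc none = some w) : w ∈ l ∧ pvNorm w = nc := by
  induction l with
  | nil => simp [pvScan] at h
  | cons v t ih =>
    simp only [pvScan, List.foldl_cons] at h
    rw [show (t.foldl (fun acc v => if pvNorm v == nc then some v else acc)
          (if pvNorm v == nc then some v else none)) = pvScan t nc
          (if pvNorm v == nc then some v else none) from rfl, pvScan_init] at h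
    cases hs : pvScan t nc none with
    | some u =>
      rw [hs] at h
      rcases ih (hs.trans h) with ⟨hm, hn⟩
      exact ⟨List.mem_cons_of_mem _ hm, hn⟩
    | none =>
      rw [hs] at h
      by_cases hv : pvNorm v == nc
      · simp only [hv, if_true, Option.some.injEq] at h
        subst h
        exact ⟨List.mem_cons_self, by simpa using hv⟩
      · simp [hv] at h

-- membership in B's inverted index
theorem pv_want_mem (candidates : List String) (nc : String) (j : Nat) (i : Int) :
    i ∈ (((PySem.List.enumerate candidates).foldl
        (fun d p => d.modify (pvNorm p.2) [] (· ++ [p.1])) PySem.Dict.empty).getD nc [])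
      ↔ ∃ (k : Nat) (h : k < candidates.length), (k : Int) = i ∧ pvNorm candidates[k] = nc := by
  have hfold := PySem.Dict.getD_foldl_modify_append
      ((PySem.List.enumerate candidates).map (fun p => (pvNorm p.2, p.1)))
      (PySem.Dict.empty) nc
  rw [List.foldl_map] at hfold
  rw [hfold]
  simp only [PySem.Dict.getD_empty, List.nil_append, List.mem_map, List.mem_filter]
  constructor
  · rintro ⟨q, ⟨hq, hnc⟩, rfl⟩
    rcases hq with ⟨p, hp, rfl⟩
    rcases (PySem.List.mem_enumerate_iff _ _ _).mp hp with ⟨k, hk, rfl⟩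
    exact ⟨k, hk, by simp, by simpa using hnc⟩
  · rintro ⟨k, hk, hki, hnc⟩
    refine ⟨_, ⟨⟨((0 : Int) + (k : Int), candidates[k]),
      (PySem.List.mem_enumerate_iff _ _ _).mpr ⟨k, hk, rfl⟩, rfl⟩, ?_⟩, ?_⟩
    · simpa using hnc
    · simpa using hki

theorem pv_setfold_length (idxs : List Int) (x : String) (r : List String) :
    (idxs.foldl (fun r i => r.set i.toNat x) r).length = r.length := by
  induction idxs generalizing r with
  | nil => rfl
  | cons i t ih => simp [ih]

theorem pv_setfold_get (idxs : List Int) (x : String) :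
    ∀ (r : List String) (j : Nat), j < r.length →
    (idxs.foldl (fun r i => r.set i.toNat x) r)[j]?
      = if ∃ i ∈ idxs, i.toNat = j then some x else r[j]? := by
  induction idxs with
  | nil => intro r j hj; simp
  | cons i t ih =>
    intro r j hj
    simp only [List.foldl_cons]
    rw [ih _ _ (by simpa using hj)]
    by_cases ht : ∃ i ∈ t, i.toNat = j
    · rw [if_pos ht, if_pos (ht.imp fun a ⟨hm, he⟩ => ⟨List.mem_cons_of_mem _ hm, he⟩)]
    · rw [if_neg ht]
      by_cases hi : i.toNat = j
      · rw [List.getElem?_set, if_pos hi, if_pos (hi ▸ hj),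
          if_pos (⟨i, List.mem_cons_self, hi⟩ : ∃ i' ∈ i :: t, i'.toNat = j)]
      · have hcons : ¬ ∃ i' ∈ i :: t, i'.toNat = j := by
          rintro ⟨i', hi', he⟩
          rcases List.mem_cons.mp hi' with rfl | hm
          · exact hi he
          · exact ht ⟨i', hm, he⟩
        rw [List.getElem?_set, if_neg hi, if_neg hcons]

theorem pv_outer_length (candidates : List String) (l : List String) (r : List String) :
    (l.foldl (fun resolved real_path =>
      ((((PySem.List.enumerate candidates).foldl
        (fun d p => d.modify (pvNorm p.2) [] (· ++ [p.1])) PySem.Dict.empty)).getD (pvNorm real_path) []).foldl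
        (fun r i => r.set i.toNat (pvSlashed real_path)) resolved) r).length = r.length := by
  induction l generalizing r with
  | nil => rfl
  | cons v t ih => simp [ih, pv_setfold_length]

theorem pv_outer_get (candidates : List String) (l : List String) :
    ∀ (r : List String), r.length = candidates.length → ∀ (j : Nat) (hj : j < candidates.length),
    (l.foldl (fun resolved real_path =>
      ((((PySem.List.enumerate candidates).foldl
        (fun d p => d.modify (pvNorm p.2) [] (· ++ [p.1])) PySem.Dict.empty)).getD (pvNorm real_path) []).foldl
        (fun r i => r.set i.toNat (pvSlashed real_path)) resolved) r)[j]?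
      = match pvScan l (pvNorm candidates[j]) none with
        | some w => some (pvSlashed w)
        | none => r[j]? := by
  induction l with
  | nil => intro r hr j hj; simp [pvScan]
  | cons v t ih =>
    intro r hr j hj
    simp only [List.foldl_cons]
    rw [ih _ (by rw [pv_setfold_length]; exact hr) j hj]
    have hcons : pvScan (v :: t) (pvNorm candidates[j]) none
        = match pvScan t (pvNorm candidates[j]) none with
          | some w => some w
          | none => if pvNorm v == pvNorm candidates[j] then some v else none := by
      have h1 : pvScan (v :: t) (pvNorm candidates[j]) none
          = pvScan t (pvNorm candidates[j]) (if pvNorm v == pvNorm candidates[j] then some v else none) := by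
        simp only [pvScan, List.foldl_cons]
      rw [h1, pvScan_init]
    rw [hcons]
    cases hs : pvScan t (pvNorm candidates[j]) none with
    | some w => simp
    | none =>
      simp only
      rw [pv_setfold_get _ _ _ j (by rw [hr]; exact hj)]
      have hmem : (∃ i ∈ (((PySem.List.enumerate candidates).foldl
            (fun d p => d.modify (pvNorm p.2) [] (· ++ [p.1])) PySem.Dict.empty).getD (pvNorm v) []),
            i.toNat = j) ↔ pvNorm candidates[j] = pvNorm v := by
        constructor
        · rintro ⟨i, hi, hij⟩
          rcases (pv_want_mem candidates (pvNorm v) j i).mp hi with ⟨k, hk, hki, hnc⟩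
          subst hki
          have hkj : k = j := by simpa using hij
          subst hkj
          exact hnc
        · intro h
          exact ⟨(j : Int), (pv_want_mem candidates (pvNorm v) j (j : Int)).mpr ⟨j, hj, rfl, h⟩, by simp⟩
      by_cases hv : pvNorm v = pvNorm candidates[j]
      · rw [if_pos (hmem.mpr hv.symm)]
        simp [hv]
      · have hne : ¬ ∃ i ∈ (((PySem.List.enumerate candidates).foldl
            (fun d p => d.modify (pvNorm p.2) [] (· ++ [p.1])) PySem.Dict.empty).getD (pvNorm v) []),
            i.toNat = j := fun h => hv (hmem.mp h).symm
        rw [if_neg hne]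
        simp [hv]

-- ===== VERDICT (by name: the statement is the Claim_ definition above) =====
theorem normalize_candidate_paths_against_dtree_spec : Claim_equal_normalize_candidate_paths_against_dtree := by
  intro candidates all_vars _ hpre
  unfold Spec_normalize_candidate_paths_against_dtree
  unfold normalize_candidate_paths_against_dtree normalize_candidate_paths_against_dtree_alt
  dsimp only
  rw [PySem.List.foldl_append_singleton_eq_map, List.nil_append]
  apply List.ext_getElem?
  intro j
  by_cases hj : j < candidates.length
  · rw [pv_outer_get candidates all_vars candidates rfl j hj]
    rw [List.getElem?_map, List.getElem?_eq_getElem hj]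
    simp only [Option.map_some]
    rw [pv_dict_eq_scan, PySem.Dict.get?_empty, pvScan]
    cases hs : pvScan all_vars (pvNorm candidates[j]) none with
    | some w =>
      have hw : w ≠ "" := by
        intro hemp
        rcases pvScan_mem _ _ _ hs with ⟨hm, hn⟩
        subst hemp
        exact hpre ⟨hm, candidates[j], List.getElem_mem hj, by simpa using hn.symm⟩
      simp only [pvScan] at hs
      rw [hs]
      simp [hw]
    | none =>
      simp only [pvScan] at hs
      rw [hs]
  · have hn : candidates.length ≤ j := Nat.le_of_not_lt hj
    apply Eq.trans (List.getElem?_eq_none ?_) (Eq.symm (List.getElem?_eq_none ?_))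
    · simpa using hn
    · rw [pv_outer_length]; exact hn
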